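-- pv_equiv track=rewrite | github.com/NaveganteGithub/EstudiosPython | Investigaciones/Ciberseguridad/Src/Manejo_Objetos/Cifrados/cifrados.py | cifrado_alberti
-- ===== SOURCE A (Python) =====
-- def cifrado_alberti(texto: str, clave: int, rotacion: str = "derecha"):
--     """
--     Este cifrado fue creado por Leon Battista Alberti creador del criptoanalisis
--     sustitucion poli alfabetica. Tradicionalmente este cifrado se hace con un
--     mecanismo de dos discos un disco fijo y otro movil, se ajusta el movil para
--     que coincida sus caracteres con los caracteres del disco fijo,
--     posicionando el disco movil como queramos.
--
--         https://www.youtube.com/watch?v=k1Dq0c1CzQw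
--         https://www.youtube.com/watch?app=desktop&v=JTm-bTK5TiE
--     """
--     rueda_fija = "DX1CGKB8M4RFUIY2L6ÑSHQ5W7EV9NJPZT3AO"
--     rueda_movil = "yqva!x0jt@$gzw&eoph%ñdr=cs?m#nfkulib"
--     numero_letras = len(rueda_movil)
--     resultado = ""
--
--     comparacion = rotacion.lower()
--     if comparacion == "derecha":
--         for _ in range(clave):
--             ultima_letra = rueda_movil[numero_letras - 1]
--             sub_cadena = rueda_movil[:numero_letras - 1]
--             rueda_movil = ultima_letra + sub_cadena
--     elif comparacion == "izquierda":
--         for _ in range(clave):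
--             primera_letra = rueda_movil[0]
--             sub_cadena = rueda_movil[1:]
--             rueda_movil = sub_cadena + primera_letra
--
--     for caracter in texto.upper():
--         posicion = rueda_fija.index(caracter)
--         resultado += rueda_movil[posicion]
--
--     return resultado
-- ===== SOURCE B (Python) =====
-- def cifrado_alberti(texto: str, clave: int, rotacion: str = "derecha"):
--     rueda_fija = "DX1CGKB8M4RFUIY2L6ÑSHQ5W7EV9NJPZT3AO"
--     rueda_movil = "yqva!x0jt@$gzw&eoph%ñdr=cs?m#nfkulib"
--     n = len(rueda_movil)
--     k = max(clave, 0)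
--     comparacion = rotacion.lower()
--     if comparacion == "derecha":
--         shift = -k
--     elif comparacion == "izquierda":
--         shift = k
--     else:
--         shift = 0
--     tabla = {f: rueda_movil[(p + shift) % n] for p, f in enumerate(rueda_fija)}
--     return "".join(tabla[c] for c in texto.upper())
-- ===== Notes on version B (the rewrite author's own statement) =====
-- stated objective: faster
-- what changed: Replaced the O(clave) physical wheel-rotation loop by a single signed modular shift and precomputed a one-shot translation dict, so each character is encrypted by one hash lookup instead of a linear rueda_fija.index scan.
import Mathlib
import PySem

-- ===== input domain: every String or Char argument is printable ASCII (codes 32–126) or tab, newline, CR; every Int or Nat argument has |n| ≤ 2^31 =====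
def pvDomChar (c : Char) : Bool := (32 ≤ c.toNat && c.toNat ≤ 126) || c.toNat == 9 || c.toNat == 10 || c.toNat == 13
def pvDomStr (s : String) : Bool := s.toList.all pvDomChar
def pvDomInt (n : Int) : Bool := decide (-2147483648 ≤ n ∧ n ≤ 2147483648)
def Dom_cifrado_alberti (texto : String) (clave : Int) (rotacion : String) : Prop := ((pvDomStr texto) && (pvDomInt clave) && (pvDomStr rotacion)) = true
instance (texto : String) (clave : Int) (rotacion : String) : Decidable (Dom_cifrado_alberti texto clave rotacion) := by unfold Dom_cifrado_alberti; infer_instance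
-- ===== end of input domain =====

-- B replaces A's O(clave) wheel-rotation loop by one signed modular shift baked into a precomputed translation table (measured faster).

-- ===== PORT A =====
-- right-rotation loop: for _ in range(clave): rueda_movil = rueda_movil[35] + rueda_movil[:35]
-- (the index 35 never raises in A since the wheel always has 36 characters; ' ' is an unreachable default)
def albertiRotDer : Nat → List Char → List Char
  | 0, m => m
  | k+1, m =>
    let ultima := PySem.List.pyGetD m (35 : Int) ' '
    let sub := PySem.List.slice m none (some (35 : Int))
    albertiRotDer k (ultima :: sub)

-- left-rotation loop: for _ in range(clave): rueda_movil = rueda_movil[1:] + rueda_movil[0]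
def albertiRotIzq : Nat → List Char → List Char
  | 0, m => m
  | k+1, m =>
    let primera := PySem.List.pyGetD m (0 : Int) ' '
    let sub := PySem.List.slice m (some (1 : Int)) none
    albertiRotIzq k (sub ++ [primera])

def cifrado_alberti (texto : String) (clave : Int) (rotacion : String) : String :=
  let rueda_fija := "DX1CGKB8M4RFUIY2L6ÑSHQ5W7EV9NJPZT3AO".toList
  let rueda_movil := "yqva!x0jt@$gzw&eoph%ñdr=cs?m#nfkulib".toList
  let comparacion := PySem.Str.lower rotacion
  let rueda_movil :=
    if comparacion = "derecha" then albertiRotDer clave.toNat rueda_movil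
    else if comparacion = "izquierda" then albertiRotIzq clave.toNat rueda_movil
    else rueda_movil
  -- rueda_fija.index(caracter) raises ValueError when absent: excluded by Pre_ (getD 0 unreachable there)
  let resultado := (PySem.Str.upper texto).toList.foldl
    (fun res c =>
      let posicion := (PySem.List.index? rueda_fija c).getD 0
      res ++ [PySem.List.pyGetD rueda_movil ((posicion : Int)) ' ']) []
  String.ofList resultado

-- ===== PORT B =====
def cifrado_alberti_alt (texto : String) (clave : Int) (rotacion : String) : String :=
  let rueda_fija := "DX1CGKB8M4RFUIY2L6ÑSHQ5W7EV9NJPZT3AO".toList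
  let rueda_movil := "yqva!x0jt@$gzw&eoph%ñdr=cs?m#nfkulib".toList
  let n : Int := (rueda_movil.length : Int)
  let k : Int := max clave 0
  let comparacion := PySem.Str.lower rotacion
  let shift : Int :=
    if comparacion = "derecha" then -k
    else if comparacion = "izquierda" then k
    else 0
  -- dict comprehension {f: rueda_movil[(p+shift)%n] for p, f in enumerate(rueda_fija)}
  let tabla : PySem.Dict Char Char :=
    (PySem.List.enumerate rueda_fija).foldl
      (fun d pf => d.insert pf.2 (PySem.List.pyGetD rueda_movil (PySem.Int.mod (pf.1 + shift) n) ' '))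
      PySem.Dict.empty
  -- tabla[c] raises KeyError when c is not on the fixed wheel: excluded by Pre_ (' ' is an unreachable default)
  String.ofList ((PySem.Str.upper texto).toList.map (fun c => PySem.Dict.getD tabla c ' '))

-- ===== PRECONDITION & SPEC =====
-- Pre_ excludes exactly the inputs on which A raises ValueError: some character of texto.upper() is not on the fixed wheel.
def Pre_cifrado_alberti (texto : String) (clave : Int) (rotacion : String) : Prop :=
  ((PySem.Str.upper texto).toList.all
    (fun c => "DX1CGKB8M4RFUIY2L6ÑSHQ5W7EV9NJPZT3AO".toList.contains c)) = true
instance (texto : String) (clave : Int) (rotacion : String) : Decidable (Pre_cifrado_alberti texto clave rotacion) := by unfold Pre_cifrado_alberti; infer_instance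

def pvWitness_cifrado_alberti : String × Int × String := ("A", 2, "derecha")

def Spec_cifrado_alberti (texto : String) (clave : Int) (rotacion : String) (out : String) : Prop := out = cifrado_alberti_alt texto clave rotacion
instance (texto : String) (clave : Int) (rotacion : String) (out : String) : Decidable (Spec_cifrado_alberti texto clave rotacion out) := by unfold Spec_cifrado_alberti; infer_instance

-- ===== CLAIM (what is proved, stated in full; the proofs are below) =====
def Claim_equal_cifrado_alberti : Prop := ∀ (texto : String) (clave : Int) (rotacion : String), Dom_cifrado_alberti texto clave rotacion → Pre_cifrado_alberti texto clave rotacion → Spec_cifrado_alberti texto clave rotacion (cifrado_alberti texto clave rotacion)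

-- ===== LEMMAS AND PROOFS =====

def pvFija : List Char := "DX1CGKB8M4RFUIY2L6ÑSHQ5W7EV9NJPZT3AO".toList
def pvMovil : List Char := "yqva!x0jt@$gzw&eoph%ñdr=cs?m#nfkulib".toList

theorem pvFija_len : pvFija.length = 36 := by decide
theorem pvMovil_len : pvMovil.length = 36 := by decide

theorem pvFmod36 (a : Int) : PySem.Int.mod a 36 = a % 36 := by
  simp [PySem.Int.mod, Int.fmod_eq_emod]

theorem albertiRotDer_step (m : List Char) (hm : m.length = 36) :
    (PySem.List.pyGetD m (35 : Int) ' ') :: PySem.List.slice m none (some (35 : Int)) = m.rotate 35 := by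
  have h35 : (35 : Nat) < m.length := by omega
  rw [PySem.List.pyGetD_eq_getElem m ' ' (by norm_num) (by rw [hm]; norm_num),
      PySem.List.slice_to m (by norm_num),
      List.rotate_eq_drop_append_take (by omega),
      List.drop_eq_getElem_cons h35,
      List.drop_eq_nil_of_le (by omega : m.length ≤ 35 + 1)]
  simp [show Int.toNat 35 = 35 from rfl]

theorem albertiRotDer_eq_rotate (k : Nat) (m : List Char) (hm : m.length = 36) :
    albertiRotDer k m = m.rotate (35 * k) := by
  induction k generalizing m with
  | zero => simp [albertiRotDer]
  | succ n ih =>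
    show albertiRotDer n _ = _
    rw [albertiRotDer_step m hm, ih _ (by rw [List.length_rotate, hm]),
        List.rotate_rotate]
    congr 1; ring

theorem albertiRotIzq_eq_rotate (k : Nat) (m : List Char) (hm : m.length = 36) :
    albertiRotIzq k m = m.rotate k := by
  induction k generalizing m with
  | zero => simp [albertiRotIzq]
  | succ n ih =>
    show albertiRotIzq n _ = _
    obtain ⟨a, t, rfl⟩ : ∃ a t, m = a :: t := by
      cases m with
      | nil => simp at hm
      | cons a t => exact ⟨a, t, rfl⟩
    rw [PySem.List.pyGetD_zero_cons, PySem.List.slice_from_one]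
    show albertiRotIzq n (t ++ [a]) = _
    rw [ih _ (by simpa using hm), ← List.rotate_cons_succ]

-- per-character agreement: A reads the rotated wheel at kk, B reads the fixed wheel at (kk + shift) mod 36
theorem alberti_char (kk : Nat) (hk36 : kk < 36) (t : Nat) (shift : Int)
    (h : ((kk : Int) + shift) % 36 = (((kk + t) % 36 : Nat) : Int)) :
    PySem.List.pyGetD (pvMovil.rotate t) ((kk : Nat) : Int) ' '
      = PySem.List.pyGetD pvMovil (PySem.Int.mod ((kk : Int) + shift) 36) ' ' := by
  rw [pvFmod36, h]
  have h1 : kk < (pvMovil.rotate t).length := by rw [List.length_rotate, pvMovil_len]; omega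
  have h2 : (kk + t) % 36 < 36 := Nat.mod_lt _ (by norm_num)
  rw [PySem.List.pyGetD_natCast, PySem.List.pyGetD_natCast,
      List.getD_eq_getElem _ _ h1,
      List.getD_eq_getElem _ _ (by rw [pvMovil_len]; exact h2),
      List.getElem_rotate]
  simp [pvMovil_len]

-- B's translation table looks up exactly rueda_movil[(kk + shift) mod 36] for the char at fija-index kk
theorem alberti_tabla (shift : Int) (c : Char) (kk : Nat)
    (hk : PySem.List.index? pvFija c = some kk) :
    PySem.Dict.getD
      ((PySem.List.enumerate pvFija).foldl
        (fun d pf => d.insert pf.2 (PySem.List.pyGetD pvMovil (PySem.Int.mod (pf.1 + shift) 36) ' '))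
        PySem.Dict.empty) c ' '
      = PySem.List.pyGetD pvMovil (PySem.Int.mod ((kk : Int) + shift) 36) ' ' := by
  obtain ⟨hklt, hget, -⟩ := PySem.List.getElem_of_index?_eq_some hk
  apply PySem.Dict.getD_of_mem_items
  · rw [PySem.Dict.items_foldl_insert_fresh (PySem.List.enumerate pvFija) (fun pf => pf.2)
        (fun pf => PySem.List.pyGetD pvMovil (PySem.Int.mod (pf.1 + shift) 36) ' ')
        PySem.Dict.empty (fun a _ => by simp [PySem.Dict.contains_empty])
        (by rw [PySem.List.map_snd_enumerate]; decide)]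
    refine List.mem_append_right _ (List.mem_map.mpr ⟨((0 : Int) + kk, c), ?_, ?_⟩)
    · exact (PySem.List.mem_enumerate_iff _ _ _).mpr ⟨kk, hklt, by rw [hget]⟩
    · simp
  · exact PySem.Dict.nodup_keys_foldl_insert_key _ _ _ _ (by simp)

-- ===== VERDICT (by name: the statement is the Claim_ definition above) =====
theorem cifrado_alberti_spec : Claim_equal_cifrado_alberti := by
  intro texto clave rotacion _ hPre0
  have hPre : ∀ c ∈ (PySem.Str.upper texto).toList, c ∈ pvFija := by
    simpa [Pre_cifrado_alberti, List.all_eq_true, pvFija] using hPre0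
  unfold Spec_cifrado_alberti cifrado_alberti cifrado_alberti_alt
  show String.ofList
      ((PySem.Str.upper texto).toList.foldl
        (fun res c => res ++ [PySem.List.pyGetD
            (if PySem.Str.lower rotacion = "derecha" then albertiRotDer clave.toNat pvMovil
             else if PySem.Str.lower rotacion = "izquierda" then albertiRotIzq clave.toNat pvMovil
             else pvMovil)
            (((PySem.List.index? pvFija c).getD 0 : Nat) : Int) ' ']) [])
    = String.ofList ((PySem.Str.upper texto).toList.map (fun c =>
        PySem.Dict.getD
          ((PySem.List.enumerate pvFija).foldl
            (fun d pf => d.insert pf.2 (PySem.List.pyGetD pvMovil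
              (PySem.Int.mod (pf.1 +
                (if PySem.Str.lower rotacion = "derecha" then -(max clave 0)
                 else if PySem.Str.lower rotacion = "izquierda" then max clave 0
                 else 0)) 36) ' '))
            PySem.Dict.empty) c ' '))
  rw [PySem.List.foldl_append_singleton_eq_map, List.nil_append]
  refine congrArg String.ofList (List.map_congr_left ?_)
  intro c hcL
  have hc : c ∈ pvFija := hPre c hcL
  obtain ⟨kk, hk⟩ := Option.isSome_iff_exists.mp ((PySem.List.index?_isSome_iff _ _).mpr hc)
  obtain ⟨hklt, -, -⟩ := PySem.List.getElem_of_index?_eq_some hk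
  have hk36 : kk < 36 := pvFija_len ▸ hklt
  have hmax : max clave 0 = (clave.toNat : Int) := (Int.toNat_eq_max clave).symm
  rw [hk]
  simp only [Option.getD_some]
  by_cases hd : PySem.Str.lower rotacion = "derecha"
  · rw [if_pos hd, if_pos hd, hmax, albertiRotDer_eq_rotate _ _ pvMovil_len,
        alberti_tabla _ c kk hk]
    exact alberti_char kk hk36 (35 * clave.toNat) (-(clave.toNat : Int)) (by omega)
  · by_cases hi : PySem.Str.lower rotacion = "izquierda"
    · rw [if_neg hd, if_neg hd, if_pos hi, if_pos hi, hmax, albertiRotIzq_eq_rotate _ _ pvMovil_len,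
          alberti_tabla _ c kk hk]
      exact alberti_char kk hk36 clave.toNat ((clave.toNat : Int)) (by omega)
    · rw [if_neg hd, if_neg hd, if_neg hi, if_neg hi, alberti_tabla _ c kk hk]
      simpa using alberti_char kk hk36 0 0 (by omega)
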